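-- pv_equiv track=rewrite | github.com/zenkinhoo/TransportProblem | transport_problem.py | nadjiVelicinu
-- ===== SOURCE A (Python) =====
-- def nadjiVelicinu(res):
--     lista_vrsta =[]
--     lista_kolona = []
--     for index,el in enumerate(res):
--         vrsta,kolona=el[0]
--         lista_vrsta.append(vrsta)
--         lista_kolona.append(kolona)
--     lista_vrsta.sort()
--     lista_kolona.sort()
--     return lista_vrsta[-1],lista_kolona[-1]
-- ===== SOURCE B (Python) =====
-- def nadjiVelicinu(res):
--     max_vrsta, max_kolona = res[0][0]
--     for el in res[1:]:
--         vrsta, kolona = el[0]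
--         if vrsta > max_vrsta:
--             max_vrsta = vrsta
--         if kolona > max_kolona:
--             max_kolona = kolona
--     return max_vrsta, max_kolona
-- ===== Notes on version B (the rewrite author's own statement) =====
-- stated objective: faster
-- what changed: Replaces building two lists, sorting both and taking the last elements with a single pass that keeps two running maxima in scalars.
import Mathlib
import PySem

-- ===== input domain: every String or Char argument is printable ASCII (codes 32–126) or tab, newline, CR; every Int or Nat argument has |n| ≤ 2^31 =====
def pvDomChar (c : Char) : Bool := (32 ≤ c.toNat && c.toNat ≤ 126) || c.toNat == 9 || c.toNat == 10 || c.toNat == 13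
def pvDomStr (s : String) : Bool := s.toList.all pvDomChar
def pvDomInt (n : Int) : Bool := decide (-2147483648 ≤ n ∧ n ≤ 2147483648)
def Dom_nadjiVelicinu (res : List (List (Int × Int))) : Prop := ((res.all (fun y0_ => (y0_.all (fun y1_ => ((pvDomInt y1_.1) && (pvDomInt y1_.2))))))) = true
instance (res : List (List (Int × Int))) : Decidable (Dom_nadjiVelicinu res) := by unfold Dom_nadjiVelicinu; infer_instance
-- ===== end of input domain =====

-- B replaces A's build-two-lists-then-sort (O(n log n)) by a single pass keeping two running maxima (O(n)).

-- ===== PORT A =====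
-- literal transliteration: build lista_vrsta/lista_kolona by appending in an
-- enumerate loop, sort both, return the last element of each
def nadjiVelicinu (res : List (List (Int × Int))) : Int × Int :=
  let acc := (PySem.List.enumerate res).foldl
    (fun (st : List Int × List Int) ie =>
      let vk := (PySem.List.pyGet? ie.2 0).getD (0, 0)   -- el[0]; none = IndexError, excluded by Pre_
      (st.1 ++ [vk.1], st.2 ++ [vk.2])) ([], [])
  let lv := PySem.List.sorted acc.1 (fun x => x) false
  let lk := PySem.List.sorted acc.2 (fun x => x) false
  ((PySem.List.pyGet? lv (-1)).getD 0, (PySem.List.pyGet? lk (-1)).getD 0)   -- [-1]; none = IndexError, excluded by Pre_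

-- ===== PORT B =====
-- single pass with two running maxima, initialised from res[0][0]
def nadjiVelicinu_alt (res : List (List (Int × Int))) : Int × Int :=
  match res with
  | [] => (0, 0)   -- Python B raises IndexError here; outside Pre_
  | r :: rest =>
    rest.foldl (fun m el =>
      let p := (PySem.List.pyGet? el 0).getD (0, 0)   -- el[0]; none = IndexError, excluded by Pre_
      (if p.1 > m.1 then p.1 else m.1, if p.2 > m.2 then p.2 else m.2))
      ((PySem.List.pyGet? r 0).getD (0, 0))

-- ===== PRECONDITION & SPEC =====
-- Pre_ excludes exactly the inputs where Python A raises IndexError: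
-- empty res (lista_vrsta[-1]) and a row whose list is empty (el[0]).
def Pre_nadjiVelicinu (res : List (List (Int × Int))) : Prop :=
  res ≠ [] ∧ ∀ el ∈ res, el ≠ []
instance (res : List (List (Int × Int))) : Decidable (Pre_nadjiVelicinu res) := by
  unfold Pre_nadjiVelicinu; infer_instance
def pvWitness_nadjiVelicinu : (List (List (Int × Int))) := [[(1, 2)], [(3, 0)]]

def Spec_nadjiVelicinu (res : List (List (Int × Int))) (out : Int × Int) : Prop := out = nadjiVelicinu_alt res
instance (res : List (List (Int × Int))) (out : Int × Int) : Decidable (Spec_nadjiVelicinu res out) := by unfold Spec_nadjiVelicinu; infer_instance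

-- ===== CLAIM (what is proved, stated in full; the proofs are below) =====
def Claim_equal_nadjiVelicinu : Prop := ∀ (res : List (List (Int × Int))), Dom_nadjiVelicinu res → Pre_nadjiVelicinu res → Spec_nadjiVelicinu res (nadjiVelicinu res)

-- ===== LEMMAS AND PROOFS =====

-- first element of a row, as both ports compute it
def pvFirst (el : List (Int × Int)) : Int × Int := (PySem.List.pyGet? el 0).getD (0, 0)

-- running max step
def pvRMax (m x : Int) : Int := if x > m then x else m

-- A's loop builds exactly the two projected lists
theorem pvFoldA (l : List (Int × List (Int × Int))) (a b : List Int) :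
    l.foldl (fun (st : List Int × List Int) ie =>
      let vk := (PySem.List.pyGet? ie.2 0).getD (0, 0)
      (st.1 ++ [vk.1], st.2 ++ [vk.2])) (a, b)
    = (a ++ l.map (fun ie => (pvFirst ie.2).1), b ++ l.map (fun ie => (pvFirst ie.2).2)) := by
  induction l generalizing a b with
  | nil => simp
  | cons x t ih => simp [ih, pvFirst]

theorem pvEnumMap1 (res : List (List (Int × Int))) (s : Int) :
    (PySem.List.enumerate res s).map (fun ie => (pvFirst ie.2).1) = res.map (fun el => (pvFirst el).1) := by
  induction res generalizing s with
  | nil => simp [PySem.List.enumerate_nil]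
  | cons x t ih => simp [PySem.List.enumerate_cons, ih]

theorem pvEnumMap2 (res : List (List (Int × Int))) (s : Int) :
    (PySem.List.enumerate res s).map (fun ie => (pvFirst ie.2).2) = res.map (fun el => (pvFirst el).2) := by
  induction res generalizing s with
  | nil => simp [PySem.List.enumerate_nil]
  | cons x t ih => simp [PySem.List.enumerate_cons, ih]

-- B's paired fold is the pair of the two componentwise running-max folds
theorem pvFoldB (l : List (List (Int × Int))) (a b : Int) :
    l.foldl (fun m el =>
      (if ((PySem.List.pyGet? el 0).getD (0, 0)).1 > m.1 then ((PySem.List.pyGet? el 0).getD (0, 0)).1 else m.1,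
       if ((PySem.List.pyGet? el 0).getD (0, 0)).2 > m.2 then ((PySem.List.pyGet? el 0).getD (0, 0)).2 else m.2)) (a, b)
    = ((l.map (fun el => (pvFirst el).1)).foldl pvRMax a,
       (l.map (fun el => (pvFirst el).2)).foldl pvRMax b) := by
  induction l generalizing a b with
  | nil => simp
  | cons x t ih => simp [ih, pvFirst, pvRMax]

-- the running max is a member of v :: l and an upper bound of it
theorem pvRMax_spec (l : List Int) (v : Int) :
    l.foldl pvRMax v ∈ v :: l ∧ ∀ y ∈ v :: l, y ≤ l.foldl pvRMax v := by
  induction l generalizing v with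
  | nil => simp
  | cons x t ih =>
    obtain ⟨hm, hb⟩ := ih (pvRMax v x)
    have hstep : pvRMax v x = v ∨ pvRMax v x = x := by
      unfold pvRMax; split_ifs <;> simp
    refine ⟨?_, ?_⟩
    · simp only [List.foldl_cons]
      rcases List.mem_cons.mp hm with h | h
      · rcases hstep with h2 | h2 <;> rw [h, h2] <;> simp
      · simp [List.mem_cons, h]
    · intro y hy
      simp only [List.foldl_cons]
      rcases List.mem_cons.mp hy with rfl | hy'
      · have h1 : y ≤ pvRMax y x := by unfold pvRMax; split_ifs <;> omega
        exact le_trans h1 (hb _ (by simp))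
      · rcases List.mem_cons.mp hy' with rfl | hy''
        · have h1 : y ≤ pvRMax v y := by unfold pvRMax; split_ifs <;> omega
          exact le_trans h1 (hb _ (by simp))
        · exact hb _ (by simp [hy''])

-- in a ≤-sorted list, the last element bounds every element
theorem pvLast_ge (s : List Int) :
    s.Pairwise (· ≤ ·) → ∀ (hne : s ≠ []) (y : Int), y ∈ s → y ≤ s.getLast hne := by
  induction s with
  | nil => intro _ hne; simp at hne
  | cons x t ih =>
    intro hp hne y hy
    cases t with
    | nil => simp at hy; simp [hy]
    | cons z u =>
      rw [List.getLast_cons (by simp : (z :: u) ≠ [])]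
      rcases List.mem_cons.mp hy with rfl | h
      · exact (List.pairwise_cons.mp hp).1 _ (List.getLast_mem _)
      · exact ih (List.pairwise_cons.mp hp).2 (by simp) _ h

-- last of sorted(v :: l) = running max over l started at v
theorem pvSortedLast (v : Int) (l : List Int) :
    (PySem.List.pyGet? (PySem.List.sorted (v :: l) (fun x => x) false) (-1)).getD 0
      = l.foldl pvRMax v := by
  set s := PySem.List.sorted (v :: l) (fun x => x) false with hs
  have hperm : s.Perm (v :: l) := PySem.List.sorted_perm _ _ _
  have hpair : s.Pairwise (· ≤ ·) := by
    simpa using PySem.List.sorted_pairwise (xs := v :: l) (key := fun x : Int => x)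
  have hne : s ≠ [] := by
    intro h
    rw [hs, PySem.List.sorted_eq_nil_iff] at h
    simp at h
  rw [PySem.List.pyGet?_neg_one, List.getLast?_eq_getLast_of_ne_nil hne]
  simp only [Option.getD_some]
  obtain ⟨hm, hb⟩ := pvRMax_spec l v
  apply le_antisymm
  · exact hb _ (hperm.mem_iff.mp (List.getLast_mem hne))
  · exact pvLast_ge s hpair hne _ (hperm.mem_iff.mpr hm)

-- ===== VERDICT (by name: the statement is the Claim_ definition above) =====
theorem nadjiVelicinu_spec : Claim_equal_nadjiVelicinu := by
  intro res _ hpre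
  obtain ⟨hne, hrows⟩ := hpre
  obtain ⟨r, rest, rfl⟩ : ∃ r rest, res = r :: rest := by
    cases res with
    | nil => exact absurd rfl hne
    | cons r rest => exact ⟨r, rest, rfl⟩
  show nadjiVelicinu (r :: rest) = nadjiVelicinu_alt (r :: rest)
  unfold nadjiVelicinu nadjiVelicinu_alt
  simp only [pvFoldA, List.nil_append]
  rw [pvFoldB]
  rw [pvEnumMap1, pvEnumMap2]
  simp only [List.map_cons]
  rw [Prod.ext_iff]
  constructor
  · simpa [pvFirst] using pvSortedLast (pvFirst r).1 (rest.map (fun el => (pvFirst el).1))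
  · simpa [pvFirst] using pvSortedLast (pvFirst r).2 (rest.map (fun el => (pvFirst el).2))
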